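-- pv_equiv track=rewrite | github.com/hiimmuc/OCR-Handwritten-equations-solver | ocr_equation_solver/application/services/equation_solver.py | prepare_equation_for_solver
-- ===== SOURCE A (Python) =====
-- def prepare_equation_for_solver(equation: str, is_right_side: bool = False) -> str:
--     """Prepare a side of an equation for the solver"""
--     if equation[0] not in ["+", "-"]:
--         equation = "+" + equation
--
--     positions = [i for i, char in enumerate(equation) if char in ["+", "-"]]
--     positions.append(len(equation))
--
--     result = ""
--     for i in range(len(positions) - 1):
--         segment = equation[positions[i] : positions[i + 1]]
--         if is_right_side:
--             # Invert signs for right side of equation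
--             if segment[0] == "+":
--                 result += "-" + segment[1:]
--             else:
--                 result += "+" + segment[1:]
--         else:
--             result += segment
--
--     return result
-- ===== SOURCE B (Python) =====
-- _FLIP = str.maketrans("+-", "-+")
--
-- def prepare_equation_for_solver(equation: str, is_right_side: bool = False) -> str:
--     """Prepare a side of an equation for the solver"""
--     if equation[0] not in ["+", "-"]:
--         equation = "+" + equation
--     return equation.translate(_FLIP) if is_right_side else equation
-- ===== Notes on version B (the rewrite author's own statement) =====
-- stated objective: simpler
-- what changed: B removes A's sign-position index list and segment-slicing/rebuilding loop: after the same leading-sign guard it returns the string unchanged for the left side and flips every sign in one character-translation pass (str.translate) for the right side.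
import Mathlib
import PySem

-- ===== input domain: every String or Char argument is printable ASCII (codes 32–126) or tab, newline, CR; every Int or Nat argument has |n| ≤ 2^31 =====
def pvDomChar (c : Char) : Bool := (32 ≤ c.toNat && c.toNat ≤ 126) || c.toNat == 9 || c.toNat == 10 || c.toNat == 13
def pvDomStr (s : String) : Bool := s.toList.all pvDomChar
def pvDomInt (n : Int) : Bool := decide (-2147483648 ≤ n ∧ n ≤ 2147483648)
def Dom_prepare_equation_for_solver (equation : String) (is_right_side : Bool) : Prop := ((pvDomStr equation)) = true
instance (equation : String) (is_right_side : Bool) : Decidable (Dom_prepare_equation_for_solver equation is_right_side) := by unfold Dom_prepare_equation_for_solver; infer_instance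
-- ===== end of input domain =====

-- ===== PORT A =====
-- One honest line: B replaces A's sign-position index list and segment loop by
-- returning the (sign-guarded) string as-is for the left side and a single
-- per-character sign flip for the right side; same values wherever A returns.
def pvIsSign (c : Char) : Bool := c == '+' || c == '-'

-- positions = [i for i, char in enumerate(equation) if char in ["+","-"]]; positions.append(len(equation))
def pvPositions (cs : List Char) : List Int :=
  ((PySem.List.enumerate cs).filter (fun p => pvIsSign p.2)).map (fun p => p.1) ++ [(cs.length : Int)]

-- one iteration of A's segment loop (indices produced by the loop are always in range, so pyGetD's default is never read)
def pvStep (cs : List Char) (is_right_side : Bool) (res : List Char) (i : Int) : List Char :=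
  let seg := PySem.List.slice cs (some (PySem.List.pyGetD (pvPositions cs) i 0))
                                 (some (PySem.List.pyGetD (pvPositions cs) (i + 1) 0))
  if is_right_side then
    if PySem.List.pyGet? seg 0 == some '+' then res ++ '-' :: PySem.List.slice seg (some 1) none
    else res ++ '+' :: PySem.List.slice seg (some 1) none
  else res ++ seg

-- if equation[0] not in ["+","-"]: equation = "+" + equation   (empty string: Python raises IndexError; excluded by Pre_)
def pvGuardA (cs0 : List Char) : List Char :=
  match PySem.List.pyGet? cs0 0 with
  | some c => if !(pvIsSign c) then '+' :: cs0 else cs0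
  | none => '+' :: cs0

def prepare_equation_for_solver (equation : String) (is_right_side : Bool) : String :=
  String.ofList ((PySem.List.pyRange 0 (((pvPositions (pvGuardA equation.toList)).length : Int) - 1) 1).foldl
    (pvStep (pvGuardA equation.toList) is_right_side) [])

-- ===== PORT B =====
-- translate table "+-" -> "-+": flip signs, leave every other character alone
def pvSwapSign (c : Char) : Char := if c == '+' then '-' else if c == '-' then '+' else c

-- the same leading-sign guard as the Python B's first two lines
def pvGuardB (cs0 : List Char) : List Char :=
  match PySem.List.pyGet? cs0 0 with
  | some c => if pvIsSign c then cs0 else '+' :: cs0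
  | none => '+' :: cs0

def prepare_equation_for_solver_alt (equation : String) (is_right_side : Bool) : String :=
  if is_right_side then String.ofList ((pvGuardB equation.toList).map pvSwapSign)
  else String.ofList (pvGuardB equation.toList)

-- ===== PRECONDITION & SPEC =====
-- Pre_ excludes only the empty string, on which A (and B) raise IndexError at equation[0].
def Pre_prepare_equation_for_solver (equation : String) (is_right_side : Bool) : Prop :=
  equation ≠ ""
instance (equation : String) (is_right_side : Bool) : Decidable (Pre_prepare_equation_for_solver equation is_right_side) := by
  unfold Pre_prepare_equation_for_solver; infer_instance

def pvWitness_prepare_equation_for_solver : String × Bool := ("x+1", true)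

def Spec_prepare_equation_for_solver (equation : String) (is_right_side : Bool) (out : String) : Prop := out = prepare_equation_for_solver_alt equation is_right_side
instance (equation : String) (is_right_side : Bool) (out : String) : Decidable (Spec_prepare_equation_for_solver equation is_right_side out) := by unfold Spec_prepare_equation_for_solver; infer_instance

-- ===== CLAIM (what is proved, stated in full; the proofs are below) =====
def Claim_equal_prepare_equation_for_solver : Prop := ∀ (equation : String) (is_right_side : Bool), Dom_prepare_equation_for_solver equation is_right_side → Pre_prepare_equation_for_solver equation is_right_side → Spec_prepare_equation_for_solver equation is_right_side (prepare_equation_for_solver equation is_right_side)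

-- ===== LEMMAS AND PROOFS =====

-- sign indices of cs, counted from offset k (proof-side characterisation of A's `positions` comprehension)
def pvSigA (cs : List Char) (k : Nat) : List Nat :=
  match cs with
  | [] => []
  | c :: t => if pvIsSign c then k :: pvSigA t (k + 1) else pvSigA t (k + 1)

theorem pvEnumFilter (cs : List Char) (k : Nat) :
    ((PySem.List.enumerate cs (k : Int)).filter (fun p => pvIsSign p.2)).map (fun p => p.1)
      = (pvSigA cs k).map (fun n : Nat => (n : Int)) := by
  induction cs generalizing k with
  | nil => simp [pvSigA, PySem.List.enumerate]
  | cons c t ih =>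
    have h1 : ((k : Int) + 1) = ((k + 1 : Nat) : Int) := by push_cast; ring
    have ih' := ih (k + 1)
    rw [PySem.List.enumerate_cons, h1]
    by_cases hc : pvIsSign c = true
    · rw [List.filter_cons_of_pos (by simpa using hc), List.map_cons, ih']
      simp [pvSigA, hc]
    · rw [List.filter_cons_of_neg (by simpa using hc), ih']
      simp [pvSigA, hc]

theorem pvSigA_shift (cs : List Char) (k m : Nat) :
    pvSigA cs (k + m) = (pvSigA cs k).map (fun n => n + m) := by
  induction cs generalizing k with
  | nil => simp [pvSigA]
  | cons c t ih =>
    by_cases hc : pvIsSign c = true <;>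
      simp [pvSigA, hc, Nat.add_right_comm k m 1, ih (k+1)]

theorem pvSigA_signfree (cs : List Char) (k : Nat) (h : ∀ x ∈ cs, pvIsSign x = false) :
    pvSigA cs k = [] := by
  induction cs generalizing k with
  | nil => rfl
  | cons c t ih =>
    have := h c (by simp)
    simp [pvSigA, this, ih (k+1) (fun x hx => h x (by simp [hx]))]

theorem pvSigA_append (u v : List Char) (k : Nat) :
    pvSigA (u ++ v) k = pvSigA u k ++ pvSigA v (k + u.length) := by
  induction u generalizing k with
  | nil => simp [pvSigA]
  | cons c t ih =>
    by_cases hc : pvIsSign c = true <;>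
      simp [pvSigA, hc, ih (k+1), Nat.add_right_comm, Nat.add_assoc]

-- range-indexed consecutive-pair flatMap = flatMap over zipped pairs
theorem pvRangePairs {β : Type} (p : List Nat) (F : Nat → Nat → List β) :
    (List.range (p.length - 1)).flatMap (fun j => F (p.getD j 0) (p.getD (j+1) 0))
      = (p.zip p.tail).flatMap (fun ab => F ab.1 ab.2) := by
  induction p with
  | nil => simp
  | cons a q ih =>
    cases q with
    | nil => simp
    | cons b r =>
      have : (a :: b :: r).length - 1 = (b :: r).length - 1 + 1 := by simp
      rw [this, List.range_succ_eq_map]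
      simp only [List.flatMap_cons, List.flatMap_map]
      simp only [List.zip, List.tail_cons] at *
      simpa using ih

-- the core combinatorial fact: chunking cs at its sign positions and rewriting each
-- chunk's head with g (signs only) reassembles to a per-character map
theorem pvMainAux (g : Char → Char) (f : List Char → List Char)
    (hf : ∀ c u, pvIsSign c = true → (∀ x ∈ u, pvIsSign x = false) → f (c :: u) = g c :: u) :
    ∀ (n : Nat) (cs : List Char) (c : Char) (t : List Char), cs.length ≤ n → cs = c :: t →
    pvIsSign c = true →
    (((pvSigA cs 0 ++ [cs.length]).zip (pvSigA cs 0 ++ [cs.length]).tail).flatMap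
        (fun ab => f ((cs.drop ab.1).take (ab.2 - ab.1))))
      = cs.map (fun x => if pvIsSign x then g x else x) := by
  intro n
  induction n with
  | zero => intro cs c t hlen hcs _; subst hcs; simp at hlen
  | succ n ih =>
    intro cs c t hlen hcs hc
    subst hcs
    set u := t.takeWhile (fun x => !pvIsSign x) with hu_def
    set v := t.dropWhile (fun x => !pvIsSign x) with hv_def
    have htuv : u ++ v = t := List.takeWhile_append_dropWhile
    have hu : ∀ x ∈ u, pvIsSign x = false := by
      intro x hx
      have := List.mem_takeWhile_imp hx
      simpa using this
    have hmapu : u.map (fun x => if pvIsSign x then g x else x) = u := by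
      have h0 : ∀ x ∈ u, (if pvIsSign x then g x else x) = id x := fun x hx => by
        simp [hu x hx]
      rw [List.map_congr_left h0, List.map_id]
    have hsig : pvSigA (c :: t) 0 = 0 :: pvSigA t 1 := by simp [pvSigA, hc]
    have hsigt : pvSigA t 1 = pvSigA v (1 + u.length) := by
      rw [← htuv, pvSigA_append, pvSigA_signfree u 1 hu, List.nil_append]
    cases hv : v with
    | nil =>
      have ht : t = u := by rw [← htuv, hv, List.append_nil]
      have hq : pvSigA (c :: t) 0 ++ [(c :: t).length] = [0, (c :: t).length] := by
        rw [hsig, hsigt, hv]; simp [pvSigA]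
      rw [hq]
      simp only [List.zip, List.zipWith, List.flatMap_cons, List.flatMap_nil, List.append_nil,
        List.drop_zero, Nat.sub_zero, List.take_length, List.tail_cons]
      rw [ht, hf c u hc hu, List.map_cons, if_pos hc, hmapu]
    | cons d w =>
      have hd : pvIsSign d = true := by
        have h2 := List.head?_dropWhile_not (fun x => !pvIsSign x) t
        rw [← hv_def, hv] at h2
        simpa using h2
      have hcu : (c :: t) = (c :: u) ++ v := by rw [← htuv]; rfl
      set m := (c :: u).length with hm_def
      have hm1 : 1 + u.length = m := by simp [hm_def, Nat.add_comm]
      have hlencs : (c :: t).length = v.length + m := by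
        rw [hcu]; simp [hm_def]; omega
      set Q' : List Nat := pvSigA v 0 ++ [v.length] with hQ'_def
      -- q = 0 :: map (+m) Q'
      have hQ : pvSigA (c :: t) 0 ++ [(c :: t).length] = 0 :: (Q'.map (fun a => a + m)) := by
        rw [hsig, hsigt, hm1, hlencs]
        have hs := pvSigA_shift v 0 m
        simp only [Nat.zero_add] at hs
        rw [hs, hQ'_def]
        simp
      rw [hQ]
      have hQ'head : Q' = 0 :: (pvSigA w 1 ++ [v.length]) := by
        rw [hQ'_def, hv]; simp [pvSigA, hd]
      have hmap : Q'.map (fun a => a + m) = m :: ((pvSigA w 1 ++ [v.length]).map (fun a => a + m)) := by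
        rw [hQ'head]; simp
      have hzip : ((0 :: Q'.map (fun a => a + m)).zip (Q'.map (fun a => a + m)))
          = (0, m) :: ((Q'.map (fun a => a + m)).zip (Q'.map (fun a => a + m)).tail) := by
        rw [hmap]; simp [List.zip]
      have htail : (Q'.map (fun a => a + m)).tail = Q'.tail.map (fun a => a + m) := by
        rw [List.map_tail]
      simp only [List.tail_cons]
      rw [hzip, List.flatMap_cons, htail, List.zip_map, List.flatMap_map]
      -- the shifted pairs read segments of v
      have hfun : (fun ab : Nat × Nat => f (((c :: t).drop ((Prod.map (fun a => a + m) (fun a => a + m)) ab).1).take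
            (((Prod.map (fun a => a + m) (fun a => a + m)) ab).2 - ((Prod.map (fun a => a + m) (fun a => a + m)) ab).1)))
          = (fun ab : Nat × Nat => f ((v.drop ab.1).take (ab.2 - ab.1))) := by
        funext ab
        simp only [Prod.map_fst, Prod.map_snd]
        rw [hcu, List.drop_append, List.drop_eq_nil_of_le (by omega : (c :: u).length ≤ ab.1 + m),
          List.nil_append, ← hm_def, Nat.add_sub_cancel, Nat.add_sub_add_right]
      rw [hfun]
      have hvlen : v.length ≤ n := by
        have : (c :: t).length ≤ n + 1 := hlen
        omega
      rw [ih v d w hvlen hv hd]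
      -- head segment is c :: u
      have hhead : ((c :: t).drop 0).take (m - 0) = c :: u := by
        rw [List.drop_zero, Nat.sub_zero, hcu, hm_def, List.take_left]
      rw [hhead, hf c u hc hu]
      have ht' : (c :: t).map (fun x => if pvIsSign x then g x else x)
          = (g c :: u) ++ v.map (fun x => if pvIsSign x then g x else x) := by
        rw [hcu]
        simp only [List.cons_append, List.map_cons, List.map_append, if_pos hc, hmapu]
      rw [ht']

-- one loop iteration of A, written as "append a segment output"
def pvSegIdx (cs : List Char) (i : Int) : List Char :=
  PySem.List.slice cs (some (PySem.List.pyGetD (pvPositions cs) i 0))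
                      (some (PySem.List.pyGetD (pvPositions cs) (i + 1) 0))

def pvSegOut (cs : List Char) (r : Bool) (i : Int) : List Char :=
  if r then
    (if PySem.List.pyGet? (pvSegIdx cs i) 0 == some '+' then '-' :: PySem.List.slice (pvSegIdx cs i) (some 1) none
     else '+' :: PySem.List.slice (pvSegIdx cs i) (some 1) none)
  else pvSegIdx cs i

theorem pvStep_eq (cs : List Char) (r : Bool) (res : List Char) (i : Int) :
    pvStep cs r res i = res ++ pvSegOut cs r i := by
  unfold pvStep pvSegOut pvSegIdx
  cases r
  · rfl
  · simp only [reduceIte]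
    by_cases h : (PySem.List.pyGet? (PySem.List.slice cs (some (PySem.List.pyGetD (pvPositions cs) i 0))
        (some (PySem.List.pyGetD (pvPositions cs) (i + 1) 0))) 0 == some '+') = true
    · rw [if_pos h, if_pos h]
    · rw [if_neg h, if_neg h]

-- segment transforms, per side
def pvFlipSeg (seg : List Char) : List Char :=
  if PySem.List.pyGet? seg 0 == some '+' then '-' :: PySem.List.slice seg (some 1) none
  else '+' :: PySem.List.slice seg (some 1) none

theorem pvFlipSeg_chunk (c : Char) (u : List Char) (hc : pvIsSign c = true)
    (_ : ∀ x ∈ u, pvIsSign x = false) : pvFlipSeg (c :: u) = pvSwapSign c :: u := by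
  unfold pvFlipSeg
  rw [PySem.List.pyGet?_zero_cons, PySem.List.slice_from_one, List.tail_cons]
  by_cases h : c = '+'
  · subst h; simp [pvSwapSign]
  · have hm : c = '-' := by
      unfold pvIsSign at hc
      rcases Bool.or_eq_true_iff.mp hc with h1 | h2
      · exact absurd (by simpa using h1) h
      · simpa using h2
    subst hm; simp [pvSwapSign]

-- A's loop, closed form
theorem pvCore (cs : List Char) (c : Char) (t : List Char) (hcs : cs = c :: t)
    (hc : pvIsSign c = true) (r : Bool) :
    (PySem.List.pyRange 0 (((pvPositions cs).length : Int) - 1) 1).foldl (pvStep cs r) []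
      = if r then cs.map pvSwapSign else cs := by
  have hpos : pvPositions cs = (pvSigA cs 0 ++ [cs.length]).map (fun n : Nat => (n : Int)) := by
    unfold pvPositions
    have h0 := pvEnumFilter cs 0
    simp only [Nat.cast_zero] at h0
    rw [h0]
    simp
  set q : List Nat := pvSigA cs 0 ++ [cs.length] with hq_def
  have hlen' : ((pvPositions cs).length : Int) - 1 = ((q.length - 1 : Nat) : Int) := by
    rw [hpos, List.length_map]
    have : 1 ≤ q.length := by rw [hq_def]; simp
    omega
  have hget : ∀ j : Nat, PySem.List.pyGetD (pvPositions cs) (j : Int) 0 = ((q.getD j 0 : Nat) : Int) := by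
    intro j
    rw [hpos, PySem.List.pyGetD_natCast]
    have := List.getD_map q 0 (n := j) (fun n : Nat => (n : Int))
    simpa using this
  have hseg : ∀ j : Nat, pvSegIdx cs (j : Int) = (cs.drop (q.getD j 0)).take (q.getD (j+1) 0 - q.getD j 0) := by
    intro j
    unfold pvSegIdx
    have h1 : ((j : Int) + 1) = ((j + 1 : Nat) : Int) := by push_cast; ring
    rw [h1, hget j, hget (j+1), PySem.List.slice_natCast]
  have hout : ∀ j : Nat, pvSegOut cs r (j : Int)
      = (if r then pvFlipSeg else id) ((cs.drop (q.getD j 0)).take (q.getD (j+1) 0 - q.getD j 0)) := by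
    intro j
    unfold pvSegOut pvFlipSeg
    cases r <;> simp [hseg j]
  have hfold : (PySem.List.pyRange 0 (((pvPositions cs).length : Int) - 1) 1).foldl (pvStep cs r) []
      = (List.range (q.length - 1)).flatMap
          (fun j => (if r then pvFlipSeg else id) ((cs.drop (q.getD j 0)).take (q.getD (j+1) 0 - q.getD j 0))) := by
    rw [hlen', PySem.List.pyRange_zero_natCast]
    have hstep : pvStep cs r = fun res i => res ++ pvSegOut cs r i := by
      funext res i; exact pvStep_eq cs r res i
    rw [hstep, PySem.List.foldl_append_eq_flatMap, List.nil_append, List.flatMap_map]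
    have hfn : (fun j : Nat => pvSegOut cs r (j : Int))
        = (fun j : Nat => (if r then pvFlipSeg else id) ((cs.drop (q.getD j 0)).take (q.getD (j+1) 0 - q.getD j 0))) :=
      funext hout
    rw [hfn]
  rw [hfold, pvRangePairs q
    (fun a b => (if r then pvFlipSeg else id) ((cs.drop a).take (b - a)))]
  cases r
  · simp only [Bool.false_eq_true, if_false, id]
    exact (pvMainAux id id (fun c u _ _ => rfl) cs.length cs c t le_rfl hcs hc).trans
      (by simp)
  · simp only [if_true]
    refine (pvMainAux pvSwapSign pvFlipSeg pvFlipSeg_chunk cs.length cs c t le_rfl hcs hc).trans ?_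
    apply List.map_congr_left
    intro x _
    by_cases hx : pvIsSign x = true
    · rw [if_pos hx]
    · rw [if_neg hx]
      unfold pvIsSign at hx
      unfold pvSwapSign
      rw [if_neg (by intro h; exact hx (by simp [h])), if_neg (by intro h; exact hx (by simp [h]))]

-- ===== VERDICT (by name: the statement is the Claim_ definition above) =====
theorem prepare_equation_for_solver_spec : Claim_equal_prepare_equation_for_solver := by
  intro equation is_right_side _ hpre
  unfold Spec_prepare_equation_for_solver
  unfold prepare_equation_for_solver prepare_equation_for_solver_alt
  have hne : equation.toList ≠ [] := by
    intro h
    apply hpre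
    have := congrArg String.ofList h
    simpa using this
  obtain ⟨c, t, hct⟩ := List.exists_cons_of_ne_nil hne
  have hguard : pvGuardA equation.toList = pvGuardB equation.toList := by
    unfold pvGuardA pvGuardB
    rw [hct, PySem.List.pyGet?_zero_cons]
    by_cases hc : pvIsSign c = true <;> simp [hc]
  have hshape : ∃ d w, pvGuardB equation.toList = d :: w ∧ pvIsSign d = true := by
    unfold pvGuardB
    rw [hct, PySem.List.pyGet?_zero_cons]
    by_cases hc : pvIsSign c = true
    · exact ⟨c, t, by simp [hc], hc⟩
    · exact ⟨'+', c :: t, by simp [hc], by decide⟩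
  obtain ⟨d, w, hdw, hd⟩ := hshape
  rw [hguard, pvCore (pvGuardB equation.toList) d w hdw hd]
  cases is_right_side <;> simp
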